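-- pv_equiv track=rewrite | github.com/Joacim-S/AdventOfCode23 | days/d11_2.py | add_cols
-- ===== SOURCE A (Python) =====
-- def add_cols(galaxies, expansion_factor):
--     galaxies.sort()
--     offset = 0
--     galaxies_expanded = []
--     for i, g in enumerate(galaxies):
--         galaxies_expanded.append((g[0] + offset, g[1]))
--
--         if i == len(galaxies)-1:
--             return galaxies_expanded
--
--         col_difference = galaxies[i+1][0] - g[0]
--         if col_difference > 1:
--             offset += (col_difference - 1) * (expansion_factor-1)
-- ===== SOURCE B (Python) =====
-- def add_cols(galaxies, expansion_factor):
--     galaxies.sort()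
--     cols = sorted(set(c for c, _ in galaxies))
--     rank = {c: i for i, c in enumerate(cols)}
--     base = cols[0] if cols else 0
--     k = expansion_factor - 1
--     return [(c + k * (c - base - rank[c]), r) for c, r in galaxies]
-- ===== Notes on version B (the rewrite author's own statement) =====
-- stated objective: alternative
-- what changed: A threads an offset through one fused loop, bumping it at each column gap and emitting as it goes; B never accumulates gap offsets: it computes each expanded column by the closed form c + (ef-1)*(c - min_col - rank(c)), where rank(c) is c's index among the sorted distinct columns, so the number of empty columns before c is counted arithmetically rather than summed gap by gap.
-- outside the precondition, e.g. on add_cols([], 2): A returns None, B returns []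
import Mathlib
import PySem

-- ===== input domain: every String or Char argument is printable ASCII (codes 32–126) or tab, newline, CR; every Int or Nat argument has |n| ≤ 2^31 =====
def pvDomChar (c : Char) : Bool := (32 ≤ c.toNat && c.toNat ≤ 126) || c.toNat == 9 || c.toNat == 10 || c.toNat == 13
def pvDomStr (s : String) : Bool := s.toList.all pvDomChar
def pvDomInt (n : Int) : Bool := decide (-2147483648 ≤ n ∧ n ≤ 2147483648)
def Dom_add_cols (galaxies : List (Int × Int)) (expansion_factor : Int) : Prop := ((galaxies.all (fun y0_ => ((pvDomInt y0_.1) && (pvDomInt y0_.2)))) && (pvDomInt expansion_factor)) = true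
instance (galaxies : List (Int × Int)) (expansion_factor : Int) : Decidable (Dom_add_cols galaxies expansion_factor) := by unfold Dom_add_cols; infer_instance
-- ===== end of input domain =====

-- B replaces A's fused offset-accumulating loop by a closed form per galaxy:
-- expanded col = c + (ef-1)*(c - min_col - rank(c)), rank = index among sorted distinct columns ("alternative").
-- Both A and B sort `galaxies` in place (Python side); the equivalence proved here is about the return value.


-- ===== PORT A =====
-- the for-loop over the sorted list: append (g.1+offset, g.2); return at the last index;
-- otherwise bump offset by the gap to the next galaxy and continue.
def aLoop (ef offset : Int) : List (Int × Int) → List (Int × Int)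
  | [] => []            -- loop body never runs; Python falls through and returns None (excluded by Pre_)
  | [g] => [(g.1 + offset, g.2)]
  | g :: g' :: rest =>
      (g.1 + offset, g.2) ::
        aLoop ef (if g'.1 - g.1 > 1 then offset + (g'.1 - g.1 - 1) * (ef - 1) else offset)
          (g' :: rest)

def add_cols (galaxies : List (Int × Int)) (expansion_factor : Int) : List (Int × Int) :=
  aLoop expansion_factor 0 (PySem.List.sorted2 galaxies (·.1) (·.2))

-- ===== PORT B =====
def add_cols_alt (galaxies : List (Int × Int)) (expansion_factor : Int) : List (Int × Int) :=
  let s := PySem.List.sorted2 galaxies (·.1) (·.2)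
  let cols := PySem.List.sorted (PySem.Set.ofList (s.map (·.1))) (fun x => x) false
  let rank := (PySem.List.enumerate cols).foldl (fun d p => d.insert p.2 p.1) PySem.Dict.empty
  let base := match cols with | [] => 0 | c :: _ => c
  let k := expansion_factor - 1
  s.map (fun g => (g.1 + k * (g.1 - base - rank.getD g.1 0), g.2))

-- ===== PRECONDITION & SPEC =====
-- Pre_ excludes only the empty list: there Python A's loop never runs and A returns None,
-- which is not a value of the declared list type (B returns []).
def Pre_add_cols (galaxies : List (Int × Int)) (expansion_factor : Int) : Prop := galaxies ≠ []
instance (galaxies : List (Int × Int)) (expansion_factor : Int) : Decidable (Pre_add_cols galaxies expansion_factor) := by unfold Pre_add_cols; infer_instance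
def pvWitness_add_cols : (List (Int × Int)) × Int := ([(0, 0), (5, 1)], 2)

def Spec_add_cols (galaxies : List (Int × Int)) (expansion_factor : Int) (out : List (Int × Int)) : Prop := out = add_cols_alt galaxies expansion_factor
instance (galaxies : List (Int × Int)) (expansion_factor : Int) (out : List (Int × Int)) : Decidable (Spec_add_cols galaxies expansion_factor out) := by unfold Spec_add_cols; infer_instance

-- ===== CLAIM (what is proved, stated in full; the proofs are below) =====
def Claim_equal_add_cols : Prop := ∀ (galaxies : List (Int × Int)) (expansion_factor : Int), Dom_add_cols galaxies expansion_factor → Pre_add_cols galaxies expansion_factor → Spec_add_cols galaxies expansion_factor (add_cols galaxies expansion_factor)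

-- ===== LEMMAS AND PROOFS =====

-- the Boolean lexicographic "a < b" that sorted2 uses on (fst, snd)
def pvLexLt (a b : Int × Int) : Bool :=
  decide (a.1 < b.1) || (!decide (b.1 < a.1) && decide (a.2 < b.2))

theorem pvLexLt_true_fst_le {a b : Int × Int} (h : pvLexLt a b = true) : a.1 ≤ b.1 := by
  simp [pvLexLt] at h; omega

theorem pvLexLt_false_fst_le {a b : Int × Int} (h : pvLexLt a b = false) : b.1 ≤ a.1 := by
  simp [pvLexLt] at h; omega

theorem pairwise_insertBy_fst (x : Int × Int) (ys : List (Int × Int))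
    (h : ys.Pairwise (fun a b => a.1 ≤ b.1)) :
    (PySem.List.insertBy pvLexLt x ys).Pairwise (fun a b => a.1 ≤ b.1) := by
  induction ys with
  | nil => simp [PySem.List.insertBy]
  | cons y ys ih =>
    obtain ⟨hy, hys⟩ := List.pairwise_cons.mp h
    by_cases hb : pvLexLt x y = true
    · rw [PySem.List.insertBy, if_pos hb]
      refine List.Pairwise.cons ?_ (List.Pairwise.cons hy hys)
      intro z hz
      rcases List.mem_cons.mp hz with rfl | hz
      · exact pvLexLt_true_fst_le hb
      · exact le_trans (pvLexLt_true_fst_le hb) (hy z hz)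
    · have hb' : pvLexLt x y = false := by simpa using hb
      rw [PySem.List.insertBy, if_neg hb]
      refine List.Pairwise.cons ?_ (ih hys)
      intro z hz
      have hmem := (PySem.List.insertBy_perm pvLexLt x ys).mem_iff.mp hz
      rcases List.mem_cons.mp hmem with rfl | hz'
      · exact pvLexLt_false_fst_le hb'
      · exact hy z hz'

theorem pairwise_foldl_insertBy_fst (xs acc : List (Int × Int))
    (h : acc.Pairwise (fun a b => a.1 ≤ b.1)) :
    (xs.foldl (fun acc x => PySem.List.insertBy pvLexLt x acc) acc).Pairwise
      (fun a b => a.1 ≤ b.1) := by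
  induction xs generalizing acc with
  | nil => exact h
  | cons x xs ih => exact ih _ (pairwise_insertBy_fst x acc h)

theorem sorted2_pairwise_fst (xs : List (Int × Int)) :
    (PySem.List.sorted2 xs (·.1) (·.2)).Pairwise (fun a b => a.1 ≤ b.1) := by
  have : PySem.List.sorted2 xs (·.1) (·.2) =
      xs.foldl (fun acc x => PySem.List.insertBy pvLexLt x acc) [] := rfl
  rw [this]
  exact pairwise_foldl_insertBy_fst xs [] (by simp)

-- keys not in the enumerated list keep their lookup value through the rank-building fold
theorem enumFold_getD_of_not_mem (l : List Int) (s : Int) (d : PySem.Dict Int Int) (c v : Int)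
    (h : c ∉ l) :
    ((PySem.List.enumerate l s).foldl (fun d p => d.insert p.2 p.1) d).getD c v = d.getD c v := by
  induction l generalizing s d with
  | nil => simp [PySem.List.enumerate_nil]
  | cons x t ih =>
    rw [PySem.List.enumerate_cons, List.foldl_cons]
    rw [ih _ _ (fun hm => h (List.mem_cons_of_mem _ hm))]
    exact PySem.Dict.getD_insert_of_ne _ _ _ (fun he => h (he ▸ List.mem_cons_self))

-- the rank dict looks up the index of c in cols (offset by the enumeration start)
theorem enumFold_getD_idxOf (l : List Int) (s : Int) (d : PySem.Dict Int Int) (c : Int)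
    (hc : c ∈ l) (hnd : l.Nodup) :
    ((PySem.List.enumerate l s).foldl (fun d p => d.insert p.2 p.1) d).getD c 0
      = s + (l.idxOf c : Int) := by
  induction l generalizing s d with
  | nil => cases hc
  | cons x t ih =>
    obtain ⟨hx, hndt⟩ := List.nodup_cons.mp hnd
    rw [PySem.List.enumerate_cons, List.foldl_cons]
    by_cases he : c = x
    · subst he
      rw [enumFold_getD_of_not_mem _ _ _ _ _ hx, PySem.Dict.getD_insert_self]
      simp
    · have hct : c ∈ t := (List.mem_cons.mp hc).resolve_left he
      rw [ih _ _ hct hndt]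
      rw [List.idxOf_cons_ne _ (fun h' => he h'.symm)]
      push_cast
      ring

-- on a strictly increasing list, the index of a member is the number of smaller elements
theorem idxOf_eq_countP_lt (l : List Int) (c : Int) (hp : l.Pairwise (· < ·)) (hc : c ∈ l) :
    (l.idxOf c : Int) = (l.countP (fun x => decide (x < c)) : Int) := by
  induction l with
  | nil => cases hc
  | cons x t ih =>
    obtain ⟨hx, hpt⟩ := List.pairwise_cons.mp hp
    by_cases he : c = x
    · subst he
      rw [List.idxOf_cons_self]
      have : t.countP (fun x => decide (x < c)) = 0 := by
        rw [List.countP_eq_zero]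
        intro a ha
        simp only [decide_eq_true_eq]
        exact not_lt.mpr (le_of_lt (hx a ha))
      simp [this]
    · have hct : c ∈ t := (List.mem_cons.mp hc).resolve_left he
      rw [List.idxOf_cons_ne _ (fun h' => he h'.symm)]
      have hxc : x < c := hx c hct
      rw [List.countP_cons]
      simp only [decide_eq_true_eq, if_pos hxc]
      push_cast [ih hpt hct]
      omega

-- between two adjacent occupied columns the smaller-count grows by exactly one
theorem countP_lt_succ (l : List Int) (a b : Int) (hp : l.Pairwise (· < ·))
    (ha : a ∈ l) (hab : a < b)
    (hno : ∀ x ∈ l, ¬(a < x ∧ x < b)) :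
    l.countP (fun x => decide (x < b)) = l.countP (fun x => decide (x < a)) + 1 := by
  induction l with
  | nil => cases ha
  | cons h t ih =>
    obtain ⟨hh, hpt⟩ := List.pairwise_cons.mp hp
    by_cases he : a = h
    · subst he
      have h1 : t.countP (fun x => decide (x < b)) = 0 := by
        rw [List.countP_eq_zero]
        intro x hx
        simp only [decide_eq_true_eq]
        exact fun hlt => hno x (List.mem_cons_of_mem _ hx) ⟨hh x hx, hlt⟩
      have h2 : t.countP (fun x => decide (x < a)) = 0 := by
        rw [List.countP_eq_zero]
        intro x hx
        simp only [decide_eq_true_eq]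
        exact fun hlt => absurd (hh x hx) (not_lt.mpr (le_of_lt hlt))
      simp [h1, h2, hab]
    · have hat : a ∈ t := (List.mem_cons.mp ha).resolve_left he
      have hha : h < a := hh a hat
      have hhb : h < b := lt_trans hha hab
      rw [List.countP_cons, List.countP_cons]
      simp only [decide_eq_true_eq, if_pos hha, if_pos hhb]
      rw [ih hpt hat (fun x hx => hno x (List.mem_cons_of_mem _ hx))]

-- A's loop with abstract output function F: the offset invariant is F g.1 = g.1 + off
theorem aLoop_eq_map (ef : Int) (F : Int → Int) (l : List (Int × Int)) (g : Int × Int)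
    (off : Int) (h0 : F g.1 = g.1 + off)
    (hc : List.IsChain (fun a b =>
      F b.1 = F a.1 + (b.1 - a.1) +
        (if b.1 - a.1 > 1 then (b.1 - a.1 - 1) * (ef - 1) else 0)) (g :: l)) :
    aLoop ef off (g :: l) = (g :: l).map (fun x => (F x.1, x.2)) := by
  induction l generalizing g off with
  | nil => simp [aLoop, h0]
  | cons g' rest ih =>
    have hrel := hc.rel
    have hc' := hc.of_cons
    rw [aLoop, List.map_cons, h0]
    congr 1
    apply ih
    · by_cases hgt : g'.1 - g.1 > 1
      · rw [if_pos hgt]; rw [hrel, h0, if_pos hgt]; ring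
      · rw [if_neg hgt]; rw [hrel, h0, if_neg hgt]; ring
    · exact hc'

-- pairwise ≤ on fst gives monotone getElem access
theorem pairwise_fst_getElem (s : List (Int × Int)) (hp : s.Pairwise (fun a b => a.1 ≤ b.1))
    (i j : Nat) (hij : i ≤ j) (hj : j < s.length) :
    (s[i]'(Nat.lt_of_le_of_lt hij hj)).1 ≤ s[j].1 := by
  rcases Nat.lt_or_ge i j with h | h
  · exact List.pairwise_iff_getElem.mp hp i j _ hj h
  · have : i = j := le_antisymm hij h
    subst this; exact le_refl _

-- the whole argument, on an explicit nonempty sorted list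
theorem main_eq (ef : Int) (g : Int × Int) (l : List (Int × Int))
    (hp : (g :: l).Pairwise (fun a b => a.1 ≤ b.1)) :
    (let s := g :: l
     let cols := PySem.List.sorted (PySem.Set.ofList (s.map (·.1))) (fun x => x) false
     let rank := (PySem.List.enumerate cols).foldl (fun d p => d.insert p.2 p.1) PySem.Dict.empty
     let base := match cols with | [] => 0 | c :: _ => c
     aLoop ef 0 s =
       s.map (fun x => (x.1 + (ef - 1) * (x.1 - base - rank.getD x.1 0), x.2))) := by
  intro s cols rank base
  -- facts about cols
  have hmem : ∀ c : Int, c ∈ cols ↔ c ∈ s.map (·.1) := by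
    intro c
    rw [PySem.List.mem_sorted, PySem.Set.mem_ofList]
  have hcolsp : cols.Pairwise (· < ·) := PySem.List.sorted_ofList_pairwise_lt _
  have hnd : cols.Nodup := hcolsp.imp ne_of_lt
  have hg1 : g.1 ∈ cols := (hmem g.1).mpr (by simp [s])
  have hge : ∀ c ∈ cols, g.1 ≤ c := by
    intro c hc
    rcases List.mem_map.mp ((hmem c).mp hc) with ⟨x, hx, rfl⟩
    rcases List.mem_cons.mp hx with rfl | hx'
    · exact le_refl _
    · exact (List.pairwise_cons.mp hp).1 x hx'
  -- base is g.1 (the minimum column)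
  have hbase : base = g.1 := by
    rcases hcols0 : cols with _ | ⟨c0, t⟩
    · rw [hcols0] at hg1; cases hg1
    · have h1 : g.1 ≤ c0 := hge c0 (by rw [hcols0]; exact List.mem_cons_self)
      have h2 : c0 ≤ g.1 := by
        rw [hcols0] at hg1
        rcases List.mem_cons.mp hg1 with h | h
        · exact le_of_eq h.symm
        · exact le_of_lt ((List.pairwise_cons.mp (hcols0 ▸ hcolsp)).1 _ h)
      simp only [base, hcols0]
      omega
  -- the rank lookup as a count of smaller occupied columns
  have hrank : ∀ c ∈ cols, rank.getD c 0 = (cols.countP (fun x => decide (x < c)) : Int) := by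
    intro c hc
    have := enumFold_getD_idxOf cols 0 PySem.Dict.empty c hc hnd
    rw [this, idxOf_eq_countP_lt cols c hcolsp hc]
    ring
  -- F: the closed form B computes per column
  set F : Int → Int := fun c => c + (ef - 1) * (c - base - rank.getD c 0) with hF
  have h0 : F g.1 = g.1 + 0 := by
    have hz : cols.countP (fun x => decide (x < g.1)) = 0 := by
      rw [List.countP_eq_zero]
      intro x hx
      simp only [decide_eq_true_eq]
      exact not_lt.mpr (hge x hx)
    rw [hF]
    simp only [hrank g.1 hg1, hz, hbase]
    ring
  -- the chain condition on the sorted list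
  have hchain : List.IsChain (fun a b : Int × Int =>
      F b.1 = F a.1 + (b.1 - a.1) +
        (if b.1 - a.1 > 1 then (b.1 - a.1 - 1) * (ef - 1) else 0)) s := by
    apply List.isChain_iff_getElem.mpr
    intro i hi
    have hile : i < s.length := Nat.lt_of_succ_lt hi
    set a := s[i] with ha
    set b := s[i+1] with hb
    have hab : a.1 ≤ b.1 := pairwise_fst_getElem s hp i (i+1) (Nat.le_succ i) hi
    rcases eq_or_lt_of_le hab with heq | hlt
    · rw [hF]
      simp only [← heq]
      have : ¬ (a.1 - a.1 > 1) := by omega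
      rw [if_neg this]
      ring
    · -- both columns occupied, nothing strictly between them
      have hac : a.1 ∈ cols := (hmem a.1).mpr (List.mem_map.mpr ⟨a, List.getElem_mem hile, rfl⟩)
      have hbc : b.1 ∈ cols := (hmem b.1).mpr (List.mem_map.mpr ⟨b, List.getElem_mem hi, rfl⟩)
      have hno : ∀ x ∈ cols, ¬(a.1 < x ∧ x < b.1) := by
        intro x hx
        rcases List.mem_map.mp ((hmem x).mp hx) with ⟨y, hy, rfl⟩
        rcases List.mem_iff_getElem.mp hy with ⟨j, hj, rfl⟩
        rintro ⟨h1, h2⟩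
        rcases Nat.lt_or_ge i j with hji | hji
        · exact absurd (show b.1 ≤ (s[j]'hj).1 from pairwise_fst_getElem s hp (i+1) j hji hj)
            (by omega)
        · exact absurd (show (s[j]'hj).1 ≤ a.1 from pairwise_fst_getElem s hp j i hji hile)
            (by omega)
      have hsucc : rank.getD b.1 0 = rank.getD a.1 0 + 1 := by
        rw [hrank a.1 hac, hrank b.1 hbc,
          countP_lt_succ cols a.1 b.1 hcolsp hac hlt hno]
        push_cast; ring
      rw [hF]
      simp only [hsucc]
      by_cases hgt : b.1 - a.1 > 1
      · rw [if_pos hgt]; ring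
      · rw [if_neg hgt]
        have : b.1 = a.1 + 1 := by omega
        rw [this]; ring
  exact aLoop_eq_map ef F l g 0 h0 hchain

-- ===== VERDICT (by name: the statement is the Claim_ definition above) =====
theorem add_cols_spec : Claim_equal_add_cols := by
  intro galaxies ef _ hpre
  unfold Spec_add_cols add_cols add_cols_alt
  have hp := sorted2_pairwise_fst galaxies
  have hperm := PySem.List.sorted2_perm galaxies (fun x => x.1) (fun x => x.2) false
  rcases hs : PySem.List.sorted2 galaxies (·.1) (·.2) with _ | ⟨g, l⟩
  · rw [hs] at hperm
    exact absurd hperm.symm.eq_nil hpre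
  · rw [hs] at hp
    exact main_eq ef g l hp
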